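-- pv_equiv track=rewrite | github.com/BrettRey/erdos-problem-993 | scripts/pair_AB_attachment_search_push_fast2.py | compute_I_from_PQ_trunc
-- ===== SOURCE A (Python) =====
-- from typing import Dict, List, Optional, Sequence, Tuple
--
-- def poly_add(a: List[int], b: List[int]) -> List[int]:
--     n = max(len(a), len(b))
--     out = [0] * n
--     for i in range(n):
--         out[i] = (a[i] if i < len(a) else 0) + (b[i] if i < len(b) else 0)
--     while len(out) > 1 and out[-1] == 0:
--         out.pop()
--     return out
--
-- def poly_shift_x(a: List[int], k: int = 1) -> List[int]:
--     return [0] * k + a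
--
-- def compute_I_from_PQ_trunc(P: List[int], Q: List[int], kmax: int) -> List[int]:
--     # Truncated variant of I = (1+2x)P + (1+x)Q
--     P2 = [2 * c for c in P]
--     P1 = poly_add(P, poly_shift_x(P2, 1))
--     Q1 = poly_add(Q, poly_shift_x(Q, 1))
--     I = poly_add(P1, Q1)
--     if len(I) > kmax + 1:
--         I = I[: kmax + 1]
--     while len(I) > 1 and I[-1] == 0:
--         I.pop()
--     return I
-- ===== SOURCE B (Python) =====
-- def compute_I_from_PQ_trunc(P, Q, kmax):
--     # One fused stencil pass computing (1+2x)P + (1+x)Q directly, no helper chains.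
--     n = max(len(P), len(Q)) + 1
--     I = []
--     for i in range(n):
--         v = (P[i] if i < len(P) else 0)
--         if i >= 1:
--             v += (2 * P[i - 1] if i - 1 < len(P) else 0) + (Q[i - 1] if i - 1 < len(Q) else 0)
--         v += (Q[i] if i < len(Q) else 0)
--         I.append(v)
--     while len(I) > 1 and I[-1] == 0:
--         I.pop()
--     if len(I) > kmax + 1:
--         I = I[: kmax + 1]
--         while len(I) > 1 and I[-1] == 0:
--             I.pop()
--     return I
-- ===== Notes on version B (the rewrite author's own statement) =====
-- stated objective: simpler
-- what changed: Replaces A's chain of helper passes (scale P by 2, shift by x, three poly_add calls each with its own padding loop and trim) by a single fused stencil loop that computes each coefficient of (1+2x)P+(1+x)Q directly, followed by the same trim/truncate/trim steps.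
import Mathlib
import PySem

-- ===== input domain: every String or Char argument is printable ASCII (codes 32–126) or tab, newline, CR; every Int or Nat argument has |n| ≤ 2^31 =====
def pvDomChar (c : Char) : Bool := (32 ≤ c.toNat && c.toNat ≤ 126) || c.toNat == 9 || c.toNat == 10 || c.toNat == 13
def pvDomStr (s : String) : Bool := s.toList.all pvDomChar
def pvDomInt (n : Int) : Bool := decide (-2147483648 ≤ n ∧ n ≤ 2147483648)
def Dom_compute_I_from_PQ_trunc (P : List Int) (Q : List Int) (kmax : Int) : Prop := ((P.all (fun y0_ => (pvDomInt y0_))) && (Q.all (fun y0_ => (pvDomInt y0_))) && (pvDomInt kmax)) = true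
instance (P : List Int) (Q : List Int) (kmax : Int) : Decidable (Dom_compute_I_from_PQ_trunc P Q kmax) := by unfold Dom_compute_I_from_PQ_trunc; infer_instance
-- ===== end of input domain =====

-- B replaces A's scale/shift/poly_add helper chain by one fused stencil pass over max(len P, len Q)+1
-- coefficients followed by the same trim/truncate steps (objective: simpler; equal return value proved below).

-- the Python 'while len(out) > 1 and out[-1] == 0: out.pop()' loop, shared verbatim by both sources
def pvTrim (l : List Int) : List Int :=
  if 1 < l.length ∧ l.getLast? = some 0 then pvTrim l.dropLast else l
termination_by l.length
decreasing_by simp [List.length_dropLast]; omega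

-- ===== PORT A =====
def pvPolyAdd (a b : List Int) : List Int :=
  pvTrim ((List.range (max a.length b.length)).map (fun i => a.getD i 0 + b.getD i 0))

def pvPolyShiftX (a : List Int) (k : Nat) : List Int :=
  List.replicate k 0 ++ a

def compute_I_from_PQ_trunc (P : List Int) (Q : List Int) (kmax : Int) : List Int :=
  let P2 := P.map (fun c => 2 * c)
  let P1 := pvPolyAdd P (pvPolyShiftX P2 1)
  let Q1 := pvPolyAdd Q (pvPolyShiftX Q 1)
  let I := pvPolyAdd P1 Q1
  let I2 := if (I.length : Int) > kmax + 1 then PySem.List.slice I none (some (kmax + 1)) else I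
  pvTrim I2

-- ===== PORT B =====
def compute_I_from_PQ_trunc_alt (P : List Int) (Q : List Int) (kmax : Int) : List Int :=
  let n := max P.length Q.length + 1
  let I := (List.range n).map (fun i =>
    P.getD i 0 + (if 1 ≤ i then 2 * P.getD (i - 1) 0 + Q.getD (i - 1) 0 else 0) + Q.getD i 0)
  let I := pvTrim I
  if (I.length : Int) > kmax + 1 then
    pvTrim (PySem.List.slice I none (some (kmax + 1)))
  else I

-- ===== PRECONDITION & SPEC =====
def Spec_compute_I_from_PQ_trunc (P : List Int) (Q : List Int) (kmax : Int) (out : List Int) : Prop := out = compute_I_from_PQ_trunc_alt P Q kmax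
instance (P : List Int) (Q : List Int) (kmax : Int) (out : List Int) : Decidable (Spec_compute_I_from_PQ_trunc P Q kmax out) := by unfold Spec_compute_I_from_PQ_trunc; infer_instance

-- ===== CLAIM (what is proved, stated in full; the proofs are below) =====
def Claim_equal_compute_I_from_PQ_trunc : Prop := ∀ (P : List Int) (Q : List Int) (kmax : Int), Dom_compute_I_from_PQ_trunc P Q kmax → Spec_compute_I_from_PQ_trunc P Q kmax (compute_I_from_PQ_trunc P Q kmax)

-- ===== LEMMAS AND PROOFS =====

-- proof-only normal form of pvTrim: strip trailing zeros front-recursively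
def pvTrimF : List Int → List Int
  | [] => []
  | a :: t =>
    match pvTrimF t with
    | [] => if a = 0 then [] else [a]
    | r => a :: r

theorem pvTrimF_cons (a : Int) (l : List Int) :
    pvTrimF (a :: l) = match pvTrimF l with
      | [] => if a = 0 then [] else [a]
      | r => a :: r := rfl

theorem pvTrimF_eq_nil_iff (l : List Int) : pvTrimF l = [] ↔ ∀ i, l.getD i 0 = 0 := by
  induction l with
  | nil => simp [pvTrimF]
  | cons a t ih =>
    constructor
    · intro h i
      simp only [pvTrimF] at h
      rcases hr : pvTrimF t with _ | ⟨x, r⟩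
      · rw [hr] at h
        split_ifs at h with ha
        · cases i with
          | zero => simpa using ha
          | succ j => simpa using (ih.mp hr) j
      · rw [hr] at h; simp at h
    · intro h
      have ht : pvTrimF t = [] := ih.mpr (fun i => by simpa using h (i + 1))
      have ha : a = 0 := by simpa using h 0
      simp [pvTrimF, ht, ha]

theorem pvTrimF_getD (l : List Int) (i : Nat) : (pvTrimF l).getD i 0 = l.getD i 0 := by
  induction l generalizing i with
  | nil => rfl
  | cons a t ih =>
    simp only [pvTrimF]
    rcases hr : pvTrimF t with _ | ⟨x, r⟩
    · have ht : ∀ j, t.getD j 0 = 0 := (pvTrimF_eq_nil_iff t).mp hr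
      split_ifs with ha
      · cases i with
        | zero => simp [ha]
        | succ j =>
          simp only [List.getD_nil, List.getD_cons_succ]
          exact (ht j).symm
      · cases i with
        | zero => simp
        | succ j =>
          simp only [List.getD_cons_succ, List.getD_nil]
          exact (ht j).symm
    · cases i with
      | zero => simp
      | succ j => simpa using (hr ▸ ih j)

theorem pvTrimF_congr {l l' : List Int} (h : ∀ i, l.getD i 0 = l'.getD i 0) :
    pvTrimF l = pvTrimF l' := by
  induction l generalizing l' with
  | nil =>
    have : pvTrimF l' = [] := (pvTrimF_eq_nil_iff l').mpr (fun i => by simpa using (h i).symm)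
    simp [pvTrimF, this]
  | cons a t ih =>
    cases l' with
    | nil =>
      have h0 : pvTrimF (a :: t) = [] :=
        (pvTrimF_eq_nil_iff (a :: t)).mpr (fun i => by simpa using h i)
      rw [h0]; rfl
    | cons b t' =>
      have hab : a = b := by simpa using h 0
      have ht : pvTrimF t = pvTrimF t' := ih (fun i => by simpa using h (i + 1))
      simp only [pvTrimF, ht, hab]

theorem pvTrimF_dropLast (l : List Int) (h : l.getLast? = some 0) :
    pvTrimF l = pvTrimF l.dropLast := by
  induction l with
  | nil => rfl
  | cons a t ih =>
    cases t with
    | nil =>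
      have : a = 0 := by simpa using h
      simp [pvTrimF, this]
    | cons b t' =>
      have h' : (b :: t').getLast? = some 0 := by
        rw [← List.getLast?_cons_cons (a := a)]; exact h
      rw [List.dropLast_cons₂, pvTrimF_cons a (b :: t'), pvTrimF_cons a ((b :: t').dropLast), ih h']

theorem pvTrimF_of_getLast_ne {l : List Int} {c : Int} (h : l.getLast? = some c)
    (hc : c ≠ 0) : pvTrimF l = l := by
  induction l with
  | nil => simp at h
  | cons a t ih =>
    cases t with
    | nil =>
      have : a = c := by simpa using h
      simp [pvTrimF, this, hc]
    | cons b t' =>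
      have h' : (b :: t').getLast? = some c := by
        rw [← List.getLast?_cons_cons (a := a)]; exact h
      rw [pvTrimF_cons, ih h']

theorem pvTrim_eq (l : List Int) :
    pvTrim l = if pvTrimF l = [] then l.take 1 else pvTrimF l := by
  fun_induction pvTrim l with
  | case1 l h ih =>
    obtain ⟨hlen, hlast⟩ := h
    rw [ih, pvTrimF_dropLast l hlast]
    have htake : l.take 1 = l.dropLast.take 1 := by
      cases l with
      | nil => simp at hlen
      | cons a t =>
        cases t with
        | nil => simp at hlen
        | cons b t' => simp
    rw [htake]
  | case2 l h =>
    cases l with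
    | nil => simp [pvTrimF]
    | cons a t =>
      cases t with
      | nil =>
        rcases eq_or_ne a 0 with ha | ha
        · subst ha
          simp [pvTrimF]
        · simp [pvTrimF, ha]
      | cons b t' =>
        have hne : ¬ (b :: t').getLast? = some 0 := by
          intro hc
          exact h ⟨by simp, by rw [List.getLast?_cons_cons]; exact hc⟩
        obtain ⟨c, hc⟩ : ∃ c, (b :: t').getLast? = some c := by
          cases hx : (b :: t').getLast? with
          | none => simp [List.getLast?_eq_none_iff] at hx
          | some c => exact ⟨c, rfl⟩
        have hc0 : c ≠ 0 := by rintro rfl; exact hne hc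
        have : pvTrimF (a :: b :: t') = a :: b :: t' :=
          pvTrimF_of_getLast_ne (by rw [List.getLast?_cons_cons]; exact hc) hc0
        simp [this]

theorem pvTrim_getD (l : List Int) (i : Nat) : (pvTrim l).getD i 0 = l.getD i 0 := by
  rw [pvTrim_eq]
  split_ifs with h
  · have hz : ∀ j, l.getD j 0 = 0 := (pvTrimF_eq_nil_iff l).mp h
    cases l with
    | nil => rfl
    | cons a t =>
      cases i with
      | zero => simp
      | succ j =>
        have h2 := hz (j + 1)
        simp only [List.getD_cons_succ] at h2
        simp only [List.take_succ_cons, List.take_zero, List.getD_cons_succ, List.getD_nil]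
        exact h2.symm
  · exact pvTrimF_getD l i

theorem pvTrim_ne_nil {l : List Int} (h : l ≠ []) : pvTrim l ≠ [] := by
  rw [pvTrim_eq]
  split_ifs with hf
  · cases l with
    | nil => exact absurd rfl h
    | cons a t => simp
  · exact hf

theorem pvTrim_congr {l l' : List Int} (hl : l ≠ []) (hl' : l' ≠ [])
    (h : ∀ i, l.getD i 0 = l'.getD i 0) : pvTrim l = pvTrim l' := by
  rw [pvTrim_eq, pvTrim_eq, pvTrimF_congr h]
  split_ifs with hf
  · have hz : ∀ j, l'.getD j 0 = 0 := (pvTrimF_eq_nil_iff l').mp hf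
    have hz' : ∀ j, l.getD j 0 = 0 := fun j => (h j).trans (hz j)
    cases l with
    | nil => exact absurd rfl hl
    | cons a t =>
      cases l' with
      | nil => exact absurd rfl hl'
      | cons b t' =>
        have : a = 0 := by simpa using hz' 0
        have hb : b = 0 := by simpa using hz 0
        simp [this, hb]
  · rfl

theorem pvTrim_idem (l : List Int) : pvTrim (pvTrim l) = pvTrim l := by
  cases hl : l with
  | nil => simp [pvTrim]
  | cons a t =>
    exact pvTrim_congr (pvTrim_ne_nil (by simp)) (by simp)
      (fun i => pvTrim_getD _ i)

theorem addmap_getD (a b : List Int) (i : Nat) :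
    ((List.range (max a.length b.length)).map (fun j => a.getD j 0 + b.getD j 0)).getD i 0
      = a.getD i 0 + b.getD i 0 := by
  rcases Nat.lt_or_ge i (max a.length b.length) with h | h
  · exact PySem.List.getD_map_range _ _ _ _ h
  · have ha : a.getD i 0 = 0 := List.getD_eq_default _ _ (by omega)
    have hb : b.getD i 0 = 0 := List.getD_eq_default _ _ (by omega)
    have : ((List.range (max a.length b.length)).map
        (fun j => a.getD j 0 + b.getD j 0)).getD i 0 = 0 :=
      List.getD_eq_default _ _ (by simp; omega)
    omega

theorem pvPolyAdd_getD (a b : List Int) (i : Nat) :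
    (pvPolyAdd a b).getD i 0 = a.getD i 0 + b.getD i 0 := by
  unfold pvPolyAdd
  rw [pvTrim_getD, addmap_getD]

theorem pvPolyAdd_ne_nil {a b : List Int} (h : 0 < max a.length b.length) :
    pvPolyAdd a b ≠ [] := by
  unfold pvPolyAdd
  apply pvTrim_ne_nil
  intro hc
  have hlen := congrArg List.length hc
  rw [List.length_map, List.length_range, List.length_nil] at hlen
  omega

theorem getD_map_two (P : List Int) (i : Nat) :
    (P.map (fun c => 2 * c)).getD i 0 = 2 * P.getD i 0 := by
  simp only [List.getD_eq_getElem?_getD, List.getElem?_map]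
  cases P[i]? <;> simp

-- ===== VERDICT (by name: the statement is the Claim_ definition above) =====
theorem compute_I_from_PQ_trunc_spec : Claim_equal_compute_I_from_PQ_trunc := by
  intro P Q kmax _
  unfold Spec_compute_I_from_PQ_trunc compute_I_from_PQ_trunc compute_I_from_PQ_trunc_alt
  simp only []
  set P2 := P.map (fun c => 2 * c) with hP2
  set P1 := pvPolyAdd P (pvPolyShiftX P2 1) with hP1
  set Q1 := pvPolyAdd Q (pvPolyShiftX Q 1) with hQ1
  set U := (List.range (max P.length Q.length + 1)).map (fun i =>
    P.getD i 0 + (if 1 ≤ i then 2 * P.getD (i - 1) 0 + Q.getD (i - 1) 0 else 0) + Q.getD i 0)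
    with hU
  have hP1ne : P1 ≠ [] := pvPolyAdd_ne_nil (by simp [pvPolyShiftX])
  have key : pvPolyAdd P1 Q1 = pvTrim U := by
    unfold pvPolyAdd
    apply pvTrim_congr
    · intro hc
      have hlen := congrArg List.length hc
      rw [List.length_map, List.length_range, List.length_nil] at hlen
      have hP1len : P1.length = 0 := by omega
      exact hP1ne (List.length_eq_zero_iff.mp hP1len)
    · rw [hU]
      intro hc
      have := congrArg List.length hc
      simp at this
    · intro i
      rw [addmap_getD]
      have hUi : U.getD i 0 = P.getD i 0
          + (if 1 ≤ i then 2 * P.getD (i - 1) 0 + Q.getD (i - 1) 0 else 0) + Q.getD i 0 := by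
        rcases Nat.lt_or_ge i (max P.length Q.length + 1) with h | h
        · exact PySem.List.getD_map_range _ _ _ _ h
        · have h1 : P.getD i 0 = 0 := List.getD_eq_default _ _ (by omega)
          have h2 : Q.getD i 0 = 0 := List.getD_eq_default _ _ (by omega)
          have h3 : P.getD (i - 1) 0 = 0 := List.getD_eq_default _ _ (by omega)
          have h4 : Q.getD (i - 1) 0 = 0 := List.getD_eq_default _ _ (by omega)
          have h5 : U.getD i 0 = 0 := List.getD_eq_default _ _ (by rw [hU]; simpa using h)
          rw [h5, h1, h2, h3, h4]
          simp
      rw [hUi, hP1, hQ1, pvPolyAdd_getD, pvPolyAdd_getD]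
      cases i with
      | zero =>
        simp only [pvPolyShiftX, List.replicate_one, List.singleton_append,
          List.getD_cons_zero, if_neg (by omega : ¬ (1:Nat) ≤ 0)]
        ring
      | succ j =>
        have hs1 : (pvPolyShiftX P2 1).getD (j + 1) 0 = 2 * P.getD j 0 := by
          rw [hP2]
          simp only [pvPolyShiftX, List.replicate_one, List.singleton_append,
            List.getD_cons_succ, getD_map_two]
        have hs2 : (pvPolyShiftX Q 1).getD (j + 1) 0 = Q.getD j 0 := by
          simp only [pvPolyShiftX, List.replicate_one, List.singleton_append,
            List.getD_cons_succ]
        rw [hs1, hs2]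
        simp only [if_pos (by omega : (1:Nat) ≤ j + 1), Nat.add_sub_cancel]
        ring
  rw [key]
  split_ifs with h
  · rfl
  · exact pvTrim_idem _
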